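-- pv_equiv track=rewrite | github.com/mattb00ker/PythonPrograms | karma.py | top_effective_rank
-- ===== SOURCE A (Python) =====
-- def get_rank(card: str) -> str:
--     """
--     Return just the rank portion, e.g. '10' from '10H', or '7' from '7S'.
--     """
--     if card.startswith('10'):
--         return '10'
--     return card[:-1]
--
-- def top_effective_rank(discard_pile):
--     """
--     Determine the rank that matters for ascending-order checks.
--     - Ignore 8s on top (they're 'invisible').
--     - If the pile is empty, treat top rank as '2' (lowest).
--     """
--     if not discard_pile:
--         return '2'  # If there's no card, treat baseline as '2' (lowest)
--
--     # Scan from top down for the first non-8 card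
--     for card in reversed(discard_pile):
--         rank = get_rank(card)
--         if rank != '8':
--             return rank
--     # If the entire pile is 8s, effectively treat as '2'
--     return '2'
-- ===== SOURCE B (Python) =====
-- def get_rank(card: str) -> str:
--     if card.startswith('10'):
--         return '10'
--     return card[:-1]
--
-- def top_effective_rank(discard_pile):
--     # Forward single pass with an accumulator: the last non-8 rank seen
--     # in bottom-to-top order is the topmost non-8 rank; '2' if none.
--     result = '2'
--     for card in discard_pile:
--         rank = get_rank(card)
--         if rank != '8':
--             result = rank
--     return result
-- ===== Notes on version B (the rewrite author's own statement) =====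
-- stated objective: alternative
-- what changed: Replaces the reversed-iteration early-return scan with a single forward fold that keeps the last non-8 rank in an accumulator (no reversal, no early exit, no special empty-pile branch).
import Mathlib
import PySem

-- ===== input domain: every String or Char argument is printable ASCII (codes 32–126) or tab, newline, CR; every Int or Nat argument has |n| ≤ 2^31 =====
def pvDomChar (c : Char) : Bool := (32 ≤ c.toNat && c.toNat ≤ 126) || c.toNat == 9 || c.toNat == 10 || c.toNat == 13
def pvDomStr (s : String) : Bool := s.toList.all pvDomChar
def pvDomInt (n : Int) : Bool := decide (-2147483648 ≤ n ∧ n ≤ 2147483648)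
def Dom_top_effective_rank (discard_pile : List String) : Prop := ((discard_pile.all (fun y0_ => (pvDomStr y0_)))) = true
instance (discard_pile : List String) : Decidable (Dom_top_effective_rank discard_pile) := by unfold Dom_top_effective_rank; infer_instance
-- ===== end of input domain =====

-- B replaces A's reversed early-return scan by one forward fold with a last-non-8 accumulator (alternative decomposition, same cost).

-- ===== PORT A =====
def get_rank (card : String) : String :=
  if PySem.Str.startswith card "10" then "10"
  else PySem.Str.slice card none (some (-1))

-- 'for card in reversed(discard_pile): … return rank / return "2"' as a structural recursion over the reversed list
def top_effective_rank_loopA : List String → String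
  | [] => "2"
  | card :: rest =>
      let rank := get_rank card
      if rank ≠ "8" then rank else top_effective_rank_loopA rest

def top_effective_rank (discard_pile : List String) : String :=
  if discard_pile = [] then "2"
  else top_effective_rank_loopA discard_pile.reverse

-- ===== PORT B =====
def top_effective_rank_alt (discard_pile : List String) : String :=
  discard_pile.foldl
    (fun result card =>
      let rank := get_rank card
      if rank ≠ "8" then rank else result)
    "2"

-- ===== PRECONDITION & SPEC =====
def Spec_top_effective_rank (discard_pile : List String) (out : String) : Prop := out = top_effective_rank_alt discard_pile
instance (discard_pile : List String) (out : String) : Decidable (Spec_top_effective_rank discard_pile out) := by unfold Spec_top_effective_rank; infer_instance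

-- ===== CLAIM (what is proved, stated in full; the proofs are below) =====
def Claim_equal_top_effective_rank : Prop := ∀ (discard_pile : List String), Dom_top_effective_rank discard_pile → Spec_top_effective_rank discard_pile (top_effective_rank discard_pile)

-- ===== LEMMAS AND PROOFS =====

-- A's loop over a list is a foldr of the same step
theorem loopA_eq_foldr (l : List String) :
    top_effective_rank_loopA l
      = l.foldr (fun card acc => let rank := get_rank card; if rank ≠ "8" then rank else acc) "2" := by
  induction l with
  | nil => rfl
  | cons c rest ih => simp [top_effective_rank_loopA, ih]

-- ===== VERDICT (by name: the statement is the Claim_ definition above) =====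
theorem top_effective_rank_spec : Claim_equal_top_effective_rank := by
  intro l _
  unfold Spec_top_effective_rank top_effective_rank top_effective_rank_alt
  rcases l with _ | ⟨c, rest⟩
  · rfl
  · rw [if_neg (by simp), loopA_eq_foldr, List.foldr_reverse]
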